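-- pv_equiv track=rewrite | github.com/rgowthaman/GenPasswd | GenPasswd/functions.py | include_characters
-- ===== SOURCE A (Python) =====
-- class NoMultipleChoice(Exception):
--     pass
--
-- def include_characters(adding, characters):
--     possibility = characters
--     try:
--         character = [character for character in adding.split(',')]
--     except Exception:
--         raise NoMultipleChoice
--     for choice in character:
--         if choice.lower() == 'alphabets':
--             for alphabet in "abcdefghijklmnopqrstuvwxyzABCDEFGHIJKLMNOPQRSTUVWXYZ":
--                 if alphabet not in possibility:
--                     possibility += alphabet
--         if choice.lower() == 'lowercase':
--             for alphabet in "abcdefghijklmnopqrstuvwxyz":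
--                 if alphabet not in possibility:
--                     possibility += alphabet
--         if choice.lower() == 'uppercase':
--             for alphabet in "ABCDEFGHIJKLMNOPQRSTUVWXYZ":
--                 if alphabet not in possibility:
--                     possibility += alphabet
--         if choice.lower() == 'numbers':
--             for number in "0123456789":
--                 if number not in possibility:
--                     possibility += number
--         if choice.lower() == 'symbols':
--             for symbol in str('''!"%&'()*+,-./:;<=>?@[]^_`{|}~”$‘~#\\'''):
--                 if symbol not in possibility:
--                     possibility += symbol
--         if not choice.lower() in ['numbers', 'alphabets', 'uppercase', 'lowercase', 'symbols']:
--             for unwanteds in choice: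
--                 if unwanteds not in possibility:
--                     possibility += unwanteds
--     return possibility
-- ===== SOURCE B (Python) =====
-- _SETS = {
--     'alphabets': "abcdefghijklmnopqrstuvwxyzABCDEFGHIJKLMNOPQRSTUVWXYZ",
--     'lowercase': "abcdefghijklmnopqrstuvwxyz",
--     'uppercase': "ABCDEFGHIJKLMNOPQRSTUVWXYZ",
--     'numbers': "0123456789",
--     'symbols': '''!"%&'()*+,-./:;<=>?@[]^_`{|}~”$‘~#\\''',
-- }
--
-- def include_characters(adding, characters):
--     # Stage 1: expand every choice into one flat candidate string.
--     candidates = ''.join(_SETS.get(choice.lower(), choice)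
--                          for choice in adding.split(','))
--     # Stage 2: stateless filter — keep a candidate iff it is not already in
--     # `characters` and this is its first occurrence among the candidates.
--     extras = ''.join(ch for i, ch in enumerate(candidates)
--                      if ch not in characters and ch not in candidates[:i])
--     return characters + extras
-- ===== Notes on version B (the rewrite author's own statement) =====
-- stated objective: alternative
-- what changed: Instead of interleaving expansion with a growing accumulator, B first flattens all choices into one candidate string, then keeps each candidate by a stateless first-occurrence filter (not in characters and not in candidates[:i]) and appends the result once.
import Mathlib
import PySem

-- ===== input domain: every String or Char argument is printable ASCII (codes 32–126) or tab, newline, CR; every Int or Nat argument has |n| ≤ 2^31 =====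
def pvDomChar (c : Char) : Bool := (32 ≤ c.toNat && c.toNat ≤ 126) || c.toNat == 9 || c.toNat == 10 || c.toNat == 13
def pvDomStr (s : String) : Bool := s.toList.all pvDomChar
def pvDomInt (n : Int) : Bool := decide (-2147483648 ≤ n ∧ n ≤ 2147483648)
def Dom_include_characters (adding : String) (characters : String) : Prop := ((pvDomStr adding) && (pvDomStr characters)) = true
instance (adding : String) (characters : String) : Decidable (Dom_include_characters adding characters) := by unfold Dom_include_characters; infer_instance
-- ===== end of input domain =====

-- B replaces A's interleaved expand-and-append accumulator loop by two staged passes: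
-- flatten all choices into one candidate string, then a stateless first-occurrence filter
-- (alternative decomposition, same cost).

-- ===== PORT A =====
-- A's inner pattern: append each candidate character to the growing string when not yet a member
def pvAddA (poss : List Char) (cs : List Char) : List Char :=
  cs.foldl (fun p c => if c ∈ p then p else p ++ [c]) poss

-- one iteration of A's outer loop: six independent `if`s on choice.lower()
def pvStepA (poss : List Char) (choice : List Char) : List Char :=
  let l := PySem.Chars.lower choice
  let poss := if l = "alphabets".toList then pvAddA poss "abcdefghijklmnopqrstuvwxyzABCDEFGHIJKLMNOPQRSTUVWXYZ".toList else poss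
  let poss := if l = "lowercase".toList then pvAddA poss "abcdefghijklmnopqrstuvwxyz".toList else poss
  let poss := if l = "uppercase".toList then pvAddA poss "ABCDEFGHIJKLMNOPQRSTUVWXYZ".toList else poss
  let poss := if l = "numbers".toList then pvAddA poss "0123456789".toList else poss
  let poss := if l = "symbols".toList then pvAddA poss "!\"%&'()*+,-./:;<=>?@[]^_`{|}~”$‘~#\\".toList else poss
  if l ∈ ["numbers".toList, "alphabets".toList, "uppercase".toList, "lowercase".toList, "symbols".toList]
  then poss else pvAddA poss choice

def include_characters (adding : String) (characters : String) : String :=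
  String.ofList ((PySem.Chars.splitOn adding.toList ",".toList).foldl pvStepA characters.toList)

-- ===== PORT B =====
-- B's dict of named character sets
def pvSetsB : PySem.Dict (List Char) (List Char) :=
  PySem.Dict.mk
  [("alphabets".toList, "abcdefghijklmnopqrstuvwxyzABCDEFGHIJKLMNOPQRSTUVWXYZ".toList),
   ("lowercase".toList, "abcdefghijklmnopqrstuvwxyz".toList),
   ("uppercase".toList, "ABCDEFGHIJKLMNOPQRSTUVWXYZ".toList),
   ("numbers".toList, "0123456789".toList),
   ("symbols".toList, "!\"%&'()*+,-./:;<=>?@[]^_`{|}~”$‘~#\\".toList)]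

-- _SETS.get(choice.lower(), choice)
def pvExpandB (choice : List Char) : List Char :=
  PySem.Dict.getD pvSetsB (PySem.Chars.lower choice) choice

-- stage 2's comprehension predicate: ch not in characters and ch not in candidates[:i]
def pvKeepB (chars cand : List Char) (p : Int × Char) : Bool :=
  !(chars.contains p.2) && !((PySem.List.slice cand none (some p.1)).contains p.2)

def include_characters_alt (adding : String) (characters : String) : String :=
  let cand := PySem.Chars.join []
    ((PySem.Chars.splitOn adding.toList ",".toList).map pvExpandB)
  let extras := ((PySem.List.enumerate cand 0).filter (pvKeepB characters.toList cand)).map (·.2)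
  String.ofList (characters.toList ++ extras)

-- ===== PRECONDITION & SPEC =====
def Spec_include_characters (adding : String) (characters : String) (out : String) : Prop := out = include_characters_alt adding characters
instance (adding : String) (characters : String) (out : String) : Decidable (Spec_include_characters adding characters out) := by unfold Spec_include_characters; infer_instance

-- ===== CLAIM =====
def Claim_equal_include_characters : Prop := ∀ (adding : String) (characters : String), Dom_include_characters adding characters → Spec_include_characters adding characters (include_characters adding characters)

-- ===== LEMMAS AND PROOFS =====

-- A's six-branch dispatch equals B's dict lookup feeding the same append
theorem pvDispatch (pool choice : List Char) :
    pvStepA pool choice = pvAddA pool (pvExpandB choice) := by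
  simp only [pvStepA, pvExpandB, pvSetsB]
  generalize PySem.Chars.lower choice = l
  by_cases h1 : l = "alphabets".toList
  · subst h1; simp [PySem.Dict.getD, PySem.Dict.get?]
  by_cases h2 : l = "lowercase".toList
  · subst h2; simp [PySem.Dict.getD, PySem.Dict.get?]
  by_cases h3 : l = "uppercase".toList
  · subst h3; simp [PySem.Dict.getD, PySem.Dict.get?]
  by_cases h4 : l = "numbers".toList
  · subst h4; simp [PySem.Dict.getD, PySem.Dict.get?]
  by_cases h5 : l = "symbols".toList
  · subst h5; simp [PySem.Dict.getD, PySem.Dict.get?]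
  have h1' : ¬(l = ['a', 'l', 'p', 'h', 'a', 'b', 'e', 't', 's']) := by simpa using h1
  have h2' : ¬(l = ['l', 'o', 'w', 'e', 'r', 'c', 'a', 's', 'e']) := by simpa using h2
  have h3' : ¬(l = ['u', 'p', 'p', 'e', 'r', 'c', 'a', 's', 'e']) := by simpa using h3
  have h4' : ¬(l = ['n', 'u', 'm', 'b', 'e', 'r', 's']) := by simpa using h4
  have h5' : ¬(l = ['s', 'y', 'm', 'b', 'o', 'l', 's']) := by simpa using h5
  have b1 : ((['a', 'l', 'p', 'h', 'a', 'b', 'e', 't', 's'] : List Char) == l) = false := beq_eq_false_iff_ne.mpr (Ne.symm h1')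
  have b2 : ((['l', 'o', 'w', 'e', 'r', 'c', 'a', 's', 'e'] : List Char) == l) = false := beq_eq_false_iff_ne.mpr (Ne.symm h2')
  have b3 : ((['u', 'p', 'p', 'e', 'r', 'c', 'a', 's', 'e'] : List Char) == l) = false := beq_eq_false_iff_ne.mpr (Ne.symm h3')
  have b4 : ((['n', 'u', 'm', 'b', 'e', 'r', 's'] : List Char) == l) = false := beq_eq_false_iff_ne.mpr (Ne.symm h4')
  have b5 : ((['s', 'y', 'm', 'b', 'o', 'l', 's'] : List Char) == l) = false := beq_eq_false_iff_ne.mpr (Ne.symm h5')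
  simp [PySem.Dict.getD, PySem.Dict.get?, List.find?, h1', h2', h3', h4', h5', b1, b2, b3, b4, b5]

-- ''.join with empty separator is flatten
theorem pvJoinNil (l : List (List Char)) : PySem.Chars.join [] l = l.flatten := by
  simp [PySem.Chars.join, List.intercalate]
  induction l with
  | nil => rfl
  | cons a t ih => cases t <;> simp_all [List.intersperse]

-- A's outer loop is one big pvAddA over the flattened expansions
theorem pvOuterA (chs : List (List Char)) (pool : List Char) :
    chs.foldl pvStepA pool = pvAddA pool (PySem.Chars.join [] (chs.map pvExpandB)) := by
  induction chs generalizing pool with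
  | nil => simp [pvAddA, PySem.Chars.join, List.intercalate]
  | cons ch chs ih =>
    simp only [List.foldl_cons, pvDispatch, ih, List.map_cons, pvJoinNil, List.flatten_cons]
    simp [pvAddA, List.foldl_append]

-- core invariant: A's append fold over a suffix equals B's first-occurrence filter of it,
-- provided pool's membership is exactly chars ∪ prefix
theorem pvCore (chars : List Char) :
    ∀ (cs pre pool : List Char), (∀ c, c ∈ pool ↔ c ∈ chars ∨ c ∈ pre) →
    pvAddA pool cs
      = pool ++ (((PySem.List.enumerate cs (pre.length : Int)).filter
            (pvKeepB chars (pre ++ cs))).map (·.2)) := by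
  intro cs
  induction cs with
  | nil => intro pre pool _; simp [pvAddA, PySem.List.enumerate]
  | cons c cs ih =>
    intro pre pool h
    have hslice : PySem.List.slice (pre ++ c :: cs) none (some (pre.length : Int)) = pre := by
      rw [PySem.List.slice_to_natCast]
      simp
    have hassoc : pre ++ c :: cs = (pre ++ [c]) ++ cs := by simp
    have hlen : ((pre.length : Int) + 1) = (((pre ++ [c]).length : Nat) : Int) := by
      simp
    rw [PySem.List.enumerate_cons, List.filter_cons]
    by_cases hc : c ∈ pool
    · have hkeep : pvKeepB chars (pre ++ c :: cs) ((pre.length : Int), c) = false := by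
        rcases (h c).mp hc with hm | hm <;>
          simp [pvKeepB, hslice, List.contains_eq_mem, hm]
      have ih' := ih (pre ++ [c]) pool (by
        intro d; rw [h d]
        constructor
        · rintro (hd | hd) <;> simp [hd]
        · rintro (hd | hd)
          · exact Or.inl hd
          · rcases List.mem_append.mp hd with hd | hd
            · exact Or.inr hd
            · simp only [List.mem_singleton] at hd
              rw [hd]; exact (h c).mp hc)
      rw [hkeep]
      simp only [Bool.false_eq_true, if_false, pvAddA, List.foldl_cons, if_pos hc]
      show pvAddA pool cs = _
      rw [hassoc, hlen]
      exact ih'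
    · have hkeep : pvKeepB chars (pre ++ c :: cs) ((pre.length : Int), c) = true := by
        have h1 : c ∉ chars := fun hm => hc ((h c).mpr (Or.inl hm))
        have h2 : c ∉ pre := fun hm => hc ((h c).mpr (Or.inr hm))
        simp [pvKeepB, hslice, List.contains_eq_mem, h1, h2]
      have ih' := ih (pre ++ [c]) (pool ++ [c]) (by
        intro d
        rw [List.mem_append, h d, List.mem_append]
        simp [or_assoc])
      rw [hkeep]
      simp only [if_true, pvAddA, List.foldl_cons, if_neg hc]
      show pvAddA (pool ++ [c]) cs = _
      rw [hassoc, hlen]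
      rw [ih']
      simp

-- ===== VERDICT =====
theorem include_characters_spec : Claim_equal_include_characters := by
  intro adding characters _
  unfold Spec_include_characters include_characters include_characters_alt
  rw [pvOuterA]
  have h := pvCore characters.toList
    (PySem.Chars.join [] ((PySem.Chars.splitOn adding.toList ",".toList).map pvExpandB))
    [] characters.toList (by simp)
  simp only [List.nil_append, List.length_nil, Nat.cast_zero] at h
  exact congrArg String.ofList h
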